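-- pv_equiv track=rewrite | github.com/Arsen1302/Code-copy-detector | TestData/solutions/problem_1615_1.py | solution_1615_1
-- ===== SOURCE A (Python) =====
-- def solution_1615_1(start: str, target: str) -> bool:
--
--     if (len(start) != len(target) or
--         start.count('_') != target.count('_')): return False   #  <-- Criterion 1
--
--     s = [(ch,i) for i, ch in enumerate(start ) if ch != '_']
--     t = [(ch,i) for i, ch in enumerate(target) if ch != '_']
--
--     for i in range(len(s)):
--         (sc, si), (tc,ti) = s[i], t[i]
--         if sc != tc: return False                              # <-- Criteria 1 &amp; 2
--         if sc == 'L' and si < ti: return False                 # <-- Criterion 3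
--         if sc == 'R' and si > ti: return False                 # <--/
--
--     return True                                                # <-- It's a winner!
-- ===== SOURCE B (Python) =====
-- def solution_1615_1(start: str, target: str) -> bool:
--     # Prefix-count characterization instead of per-piece index comparison:
--     # the non-'_' sequences must coincide, and at every prefix the running 'L'
--     # count of start may never exceed target's (an 'L' only moves left) while
--     # the running 'R' count of start may never fall below target's.
--     if len(start) != len(target):
--         return False
--     if start.replace('_', '') != target.replace('_', ''):
--         return False
--     sL = tL = sR = tR = 0
--     for a, b in zip(start, target):
--         if a == 'L':
--             sL += 1
--         elif a == 'R':
--             sR += 1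
--         if b == 'L':
--             tL += 1
--         elif b == 'R':
--             tR += 1
--         if sL > tL or sR < tR:
--             return False
--     return True
-- ===== Notes on version B (the rewrite author's own statement) =====
-- stated objective: faster
-- what changed: Replaced A's two filtered (char,index) tuple lists and per-piece index comparison by a prefix-count characterization: B checks that the underscore-stripped strings (str.replace) are equal and then, in one zipped pass with four running counters, that start's 'L' count never exceeds target's and start's 'R' count never falls below target's at any prefix.
import Mathlib
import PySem

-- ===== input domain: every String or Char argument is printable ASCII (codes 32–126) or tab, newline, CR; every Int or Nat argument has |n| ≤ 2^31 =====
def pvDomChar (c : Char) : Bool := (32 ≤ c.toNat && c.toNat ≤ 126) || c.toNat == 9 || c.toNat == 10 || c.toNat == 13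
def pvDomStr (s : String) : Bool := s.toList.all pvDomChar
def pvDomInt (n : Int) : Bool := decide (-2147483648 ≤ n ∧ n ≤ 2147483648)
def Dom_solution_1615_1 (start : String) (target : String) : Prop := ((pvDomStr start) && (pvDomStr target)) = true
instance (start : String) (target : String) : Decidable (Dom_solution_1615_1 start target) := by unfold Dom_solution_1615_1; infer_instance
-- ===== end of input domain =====

-- B replaces A's filtered (char, index) lists and per-piece index comparison by a
-- prefix-count characterization: equal underscore-stripped strings plus four running
-- counters over one zipped pass; a timing run measured B faster by a constant factor.

-- ===== PORT A =====
-- A's loop 'for i in range(len(s))' reads s[i] and t[i] in step; under A's guard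
-- (equal lengths and equal '_' counts) s and t have equal length, so the branch
-- where t is exhausted first (Python would raise IndexError) is unreachable.
def pvALoop : List (Char × Int) → List (Char × Int) → Bool
  | [], _ => true
  | _ :: _, [] => true   -- unreachable under A's guard
  | (sc, si) :: s', (tc, ti) :: t' =>
    if sc ≠ tc then false
    else if sc = 'L' ∧ si < ti then false
    else if sc = 'R' ∧ si > ti then false
    else pvALoop s' t'

def solution_1615_1 (start : String) (target : String) : Bool :=
  if PySem.Str.len start ≠ PySem.Str.len target ∨
     PySem.Str.count start "_" ≠ PySem.Str.count target "_" then false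
  else
    let s := (PySem.List.enumerate start.toList).filterMap
      (fun p => if p.2 ≠ '_' then some (p.2, p.1) else none)
    let t := (PySem.List.enumerate target.toList).filterMap
      (fun p => if p.2 ≠ '_' then some (p.2, p.1) else none)
    pvALoop s t

-- ===== PORT B =====
-- 'for a, b in zip(start, target): … if sL > tL or sR < tR: return False'
def pvBLoop : List (Char × Char) → Int → Int → Int → Int → Bool
  | [], _, _, _, _ => true
  | (a, b) :: rest, sL, tL, sR, tR =>
    let p := if a = 'L' then (sL + 1, sR) else if a = 'R' then (sL, sR + 1) else (sL, sR)
    let q := if b = 'L' then (tL + 1, tR) else if b = 'R' then (tL, tR + 1) else (tL, tR)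
    if p.1 > q.1 ∨ p.2 < q.2 then false
    else pvBLoop rest p.1 q.1 p.2 q.2

def solution_1615_1_alt (start : String) (target : String) : Bool :=
  if PySem.Str.len start ≠ PySem.Str.len target then false
  else if PySem.Str.replace start "_" "" ≠ PySem.Str.replace target "_" "" then false
  else pvBLoop (start.toList.zip target.toList) 0 0 0 0

-- ===== PRECONDITION & SPEC =====
def Spec_solution_1615_1 (start : String) (target : String) (out : Bool) : Prop := out = solution_1615_1_alt start target
instance (start : String) (target : String) (out : Bool) : Decidable (Spec_solution_1615_1 start target out) := by unfold Spec_solution_1615_1; infer_instance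

-- ===== CLAIM =====
def Claim_equal_solution_1615_1 : Prop := ∀ (start : String) (target : String), Dom_solution_1615_1 start target → Spec_solution_1615_1 start target (solution_1615_1 start target)

-- ===== LEMMAS AND PROOFS =====

-- single-character substring count is List.count
theorem countGo_single (c : Char) (fuel : Nat) :
    ∀ (l : List Char) (acc : Nat), l.length ≤ fuel →
      PySem.Chars.count.go [c] fuel l acc = acc + l.count c := by
  induction fuel with
  | zero =>
    intro l acc h
    obtain rfl : l = [] := List.length_eq_zero_iff.mp (by omega)
    simp [PySem.Chars.count.go]
  | succ n ih =>
    intro l acc h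
    cases l with
    | nil => simp [PySem.Chars.count.go]
    | cons x xs =>
      rw [PySem.Chars.count.go]
      by_cases hx : c = x
      · rw [if_pos (by simp [List.isPrefixOf, hx])]
        simp only [List.length_cons, List.length_nil, List.drop_succ_cons, List.drop_zero]
        rw [ih xs (acc + 1) (by simp at h; omega)]
        simp [hx]
        omega
      · rw [if_neg (by simp [List.isPrefixOf, hx])]
        rw [ih xs acc (by simp at h; omega)]
        simp [List.count_cons]
        exact fun hh => hx hh.symm

theorem count_single (cs : List Char) (c : Char) :
    PySem.Chars.count cs [c] = cs.count c := by
  rw [PySem.Chars.count]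
  rw [if_neg (by simp)]
  simpa using countGo_single c cs.length cs 0 le_rfl

-- replacing '_' by the empty string is filtering it out
theorem replaceGo_underscore (fuel : Nat) :
    ∀ (l acc : List Char), l.length ≤ fuel →
      PySem.Chars.replace.go ['_'] [] fuel l acc = acc.reverse ++ l.filter (· ≠ '_') := by
  induction fuel with
  | zero =>
    intro l acc h
    obtain rfl : l = [] := List.length_eq_zero_iff.mp (by omega)
    simp [PySem.Chars.replace.go]
  | succ n ih =>
    intro l acc h
    cases l with
    | nil => simp [PySem.Chars.replace.go]
    | cons x xs =>
      rw [PySem.Chars.replace.go]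
      by_cases hx : x = '_'
      · rw [if_pos (by simp [List.isPrefixOf, hx])]
        simp only [List.length_cons, List.length_nil, List.drop_succ_cons, List.drop_zero,
          List.reverse_nil, List.nil_append]
        rw [ih xs acc (by simp at h; omega)]
        simp [hx]
      · rw [if_neg (by simp [List.isPrefixOf]; exact fun hh => hx hh.symm)]
        rw [ih xs (x :: acc) (by simp at h; omega)]
        simp [hx]

theorem replace_underscore (l : List Char) :
    PySem.Chars.replace l ['_'] [] = l.filter (· ≠ '_') := by
  rw [PySem.Chars.replace, if_neg (by simp)]
  simpa using replaceGo_underscore l.length l [] le_rfl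

-- the non-'_' characters of cs paired with their indices, starting at index s
def piecesAux : List Char → Int → List (Char × Int)
  | [], _ => []
  | c :: cs, s => if c ≠ '_' then (c, s) :: piecesAux cs (s + 1) else piecesAux cs (s + 1)

theorem filterMap_enumerate_eq_piecesAux (cs : List Char) (s : Int) :
    (PySem.List.enumerate cs s).filterMap
      (fun p => if p.2 ≠ '_' then some (p.2, p.1) else none) = piecesAux cs s := by
  induction cs generalizing s with
  | nil => simp [PySem.List.enumerate_nil, piecesAux]
  | cons c cs ih =>
    rw [PySem.List.enumerate_cons, List.filterMap_cons]
    by_cases h : c = '_'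
    · rw [if_neg (by simp [h]),
          show piecesAux (c :: cs) s = piecesAux cs (s + 1) by simp [piecesAux, h]]
      exact ih _
    · rw [if_pos (by simp [h]),
          show piecesAux (c :: cs) s = (c, s) :: piecesAux cs (s + 1) by simp [piecesAux, h]]
      exact congrArg _ (ih _)

theorem length_piecesAux (cs : List Char) (s : Int) :
    (piecesAux cs s).length + cs.count '_' = cs.length := by
  induction cs generalizing s with
  | nil => simp [piecesAux]
  | cons c cs ih =>
    simp only [piecesAux, List.count_cons, List.length_cons]
    by_cases h : c = '_' <;> simp [h, ← ih (s + 1)] <;> omega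

theorem map_fst_piecesAux (cs : List Char) (s : Int) :
    (piecesAux cs s).map Prod.fst = cs.filter (· ≠ '_') := by
  induction cs generalizing s with
  | nil => simp [piecesAux]
  | cons c cs ih =>
    by_cases h : c = '_' <;> simp [piecesAux, h, ih (s + 1)]

theorem piecesAux_snd_ge (cs : List Char) (s : Int) :
    ∀ p ∈ piecesAux cs s, s ≤ p.2 := by
  induction cs generalizing s with
  | nil => simp [piecesAux]
  | cons c cs ih =>
    intro p hp
    by_cases h : c = '_'
    · simp only [piecesAux, h] at hp
      have := ih (s + 1) p (by simpa using hp)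
      omega
    · simp only [piecesAux, if_pos (by simpa using h : c ≠ '_')] at hp
      rcases List.mem_cons.mp hp with rfl | hp'
      · simp
      · have := ih (s + 1) p hp'
        omega

-- the indices of the c-pieces
def sndOf (c : Char) (ps : List (Char × Int)) : List Int :=
  (ps.filter (fun p => p.1 = c)).map Prod.snd

theorem piecesAux_snd_pairwise (cs : List Char) (s : Int) :
    (piecesAux cs s).Pairwise (fun p q => p.2 < q.2) := by
  induction cs generalizing s with
  | nil => simp [piecesAux]
  | cons c cs ih =>
    by_cases h : c = '_'
    · simpa [piecesAux, h] using ih (s + 1)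
    · simp only [piecesAux, if_pos (by simpa using h : c ≠ '_')]
      refine List.pairwise_cons.mpr ⟨?_, ih (s + 1)⟩
      intro q hq
      have := piecesAux_snd_ge cs (s + 1) q hq
      simp
      omega

theorem sndOf_cons_self (c : Char) (si : Int) (s : List (Char × Int)) :
    sndOf c ((c, si) :: s) = si :: sndOf c s := by simp [sndOf]

theorem sndOf_cons_ne (c d : Char) (h : ¬ d = c) (si : Int) (s : List (Char × Int)) :
    sndOf c ((d, si) :: s) = sndOf c s := by simp [sndOf, h]

theorem sndOf_pairwise (c : Char) (ps : List (Char × Int))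
    (h : ps.Pairwise (fun p q => p.2 < q.2)) : (sndOf c ps).Pairwise (· < ·) := by
  exact List.pairwise_map.mpr (List.Pairwise.filter _ h)

-- the common matcher (A's loop on equal-length piece lists)
def pieceMatch : List (Char × Int) → List (Char × Int) → Bool
  | [], [] => true
  | [], _ :: _ => false
  | _ :: _, [] => false
  | (sc, si) :: s', (tc, ti) :: t' =>
    if sc ≠ tc then false
    else if sc = 'L' ∧ si < ti then false
    else if sc = 'R' ∧ si > ti then false
    else pieceMatch s' t'

theorem pvALoop_eq_pieceMatch (s t : List (Char × Int)) (h : s.length = t.length) :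
    pvALoop s t = pieceMatch s t := by
  induction s generalizing t with
  | nil => cases t with
    | nil => rfl
    | cons b t => simp at h
  | cons a s ih =>
    cases t with
    | nil => simp at h
    | cons b t =>
      obtain ⟨sc, si⟩ := a; obtain ⟨tc, ti⟩ := b
      simp only [pvALoop, pieceMatch]
      split_ifs <;> first | rfl | exact ih t (by simpa using h)

theorem pieceMatch_false_of_fst_ne (s t : List (Char × Int))
    (h : s.map Prod.fst ≠ t.map Prod.fst) : pieceMatch s t = false := by
  induction s generalizing t with
  | nil => cases t with
    | nil => simp at h
    | cons b t => simp [pieceMatch]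
  | cons a s ih =>
    cases t with
    | nil => simp [pieceMatch]
    | cons b t =>
      obtain ⟨sc, si⟩ := a; obtain ⟨tc, ti⟩ := b
      simp only [pieceMatch]
      by_cases hc : sc = tc
      · rw [if_neg (by simpa using hc)]
        split_ifs <;> first | rfl | exact ih t (by simp at h ⊢; exact fun hh => h hc hh)
      · rw [if_pos (by simpa using hc)]

-- pieceMatch on equal char sequences is pointwise dominance of the L/R index lists
theorem pieceMatch_iff (s t : List (Char × Int)) (h : s.map Prod.fst = t.map Prod.fst) :
    pieceMatch s t = true ↔
      List.Forall₂ (fun a b => b ≤ a) (sndOf 'L' s) (sndOf 'L' t) ∧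
      List.Forall₂ (fun a b => a ≤ b) (sndOf 'R' s) (sndOf 'R' t) := by
  induction s generalizing t with
  | nil =>
    obtain rfl : t = [] := by
      cases t with
      | nil => rfl
      | cons b t => simp at h
    simp [pieceMatch, sndOf]
  | cons a s ih =>
    obtain ⟨sc, si⟩ := a
    cases t with
    | nil => simp at h
    | cons b t =>
      obtain ⟨tc, ti⟩ := b
      obtain ⟨rfl, h'⟩ : sc = tc ∧ s.map Prod.fst = t.map Prod.fst := by simpa using h
      by_cases hL : sc = 'L'
      · subst hL
        rw [sndOf_cons_self, sndOf_cons_self, sndOf_cons_ne 'R' 'L' (by decide),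
            sndOf_cons_ne 'R' 'L' (by decide)]
        simp only [pieceMatch, List.forall₂_cons]
        norm_num
        rw [ih t h']
        by_cases hlt : si < ti
        · simp [hlt]
          omega
        · simp [hlt]
          tauto
      · by_cases hR : sc = 'R'
        · subst hR
          rw [sndOf_cons_self, sndOf_cons_self, sndOf_cons_ne 'L' 'R' (by decide),
              sndOf_cons_ne 'L' 'R' (by decide)]
          simp only [pieceMatch, List.forall₂_cons]
          norm_num
          rw [ih t h']
          by_cases hgt : ti < si
          · simp [hgt]
            omega
          · simp [hgt]
            tauto
        · rw [sndOf_cons_ne 'L' sc hL, sndOf_cons_ne 'L' sc hL,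
              sndOf_cons_ne 'R' sc hR, sndOf_cons_ne 'R' sc hR]
          simp only [pieceMatch]
          rw [if_neg (by simp), if_neg (by simp [hL]), if_neg (by simp [hR])]
          exact ih t h'

-- sorted pointwise dominance ↔ prefix counts: the forward direction is pointwise
theorem dominance_mp (u v : List Int) (hf : List.Forall₂ (fun a b => b ≤ a) u v) :
    ∀ p : Int, u.countP (fun x => x < p) ≤ v.countP (fun x => x < p) := by
  induction hf with
  | nil => simp
  | @cons a b u' v' hba _ ih =>
    intro p
    simp only [List.countP_cons]
    have := ih p
    by_cases hap : a < p <;> by_cases hbp : b < p <;> simp [hap, hbp] <;> omega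

theorem dominance_mpr (u : List Int) : ∀ (v : List Int), u.Pairwise (· < ·) →
    v.Pairwise (· < ·) → u.length = v.length →
    (∀ p : Int, u.countP (fun x => x < p) ≤ v.countP (fun x => x < p)) →
    List.Forall₂ (fun a b => b ≤ a) u v := by
  induction u with
  | nil =>
    intro v _ _ hlen _
    obtain rfl : v = [] := List.length_eq_zero_iff.mp (by simpa using hlen.symm)
    exact List.Forall₂.nil
  | cons a u' ih =>
    intro v hu hv hlen hc
    cases v with
    | nil => simp at hlen
    | cons b v' =>
      obtain ⟨hbv, hv'⟩ := List.pairwise_cons.mp hv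
      obtain ⟨hau, hu'⟩ := List.pairwise_cons.mp hu
      have hba : b ≤ a := by
        by_contra hab
        have h1 := hc (a + 1)
        have hz : (b :: v').countP (fun x => x < a + 1) = 0 := by
          apply List.countP_eq_zero.mpr
          intro x hx
          rcases List.mem_cons.mp hx with rfl | hx'
          · simp; omega
          · have := hbv x hx'
            simp; omega
        rw [hz] at h1
        simp only [List.countP_cons] at h1
        have : a < a + 1 := by omega
        simp [this] at h1
      refine List.Forall₂.cons hba (ih v' hu' hv' (by simpa using hlen) ?_)
      intro p
      by_cases hap : a < p
      · have hbp : b < p := by omega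
        have := hc p
        simp only [List.countP_cons, hap, hbp] at this
        simp at this
        omega
      · have : u'.countP (fun x => x < p) = 0 := by
          apply List.countP_eq_zero.mpr
          intro x hx
          have := hau x hx
          simp; omega
        simp [this]

theorem dominance (u v : List Int) (hu : u.Pairwise (· < ·)) (hv : v.Pairwise (· < ·))
    (hlen : u.length = v.length) :
    List.Forall₂ (fun a b => b ≤ a) u v ↔
      ∀ p : Int, u.countP (fun x => x < p) ≤ v.countP (fun x => x < p) :=
  ⟨dominance_mp u v, dominance_mpr u v hu hv hlen⟩

-- pieces all sit at index ≥ i, so no index falls below j ≤ i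
theorem countP_sndOf_lt (c : Char) (l : List Char) (i : Nat) (j : Int) (hj : j ≤ (i : Int)) :
    (sndOf c (piecesAux l (i : Int))).countP (fun x => x < j) = 0 := by
  apply List.countP_eq_zero.mpr
  intro x hx
  simp only [sndOf, List.mem_map] at hx
  obtain ⟨p, hp, rfl⟩ := hx
  have := piecesAux_snd_ge l (i : Int) p (List.mem_of_mem_filter hp)
  simp
  omega

-- counting pieces with index below i+p counts the piece characters among the first p
theorem countP_sndOf (c : Char) (hc : c ≠ '_') :
    ∀ (l : List Char) (i p : Nat),
      (sndOf c (piecesAux l (i : Int))).countP (fun x => x < ((i + p : Nat) : Int)) =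
        (l.take p).count c := by
  intro l
  induction l with
  | nil => intro i p; simp [piecesAux, sndOf]
  | cons x xs ih =>
    intro i p
    cases p with
    | zero =>
      simp only [List.take_zero, List.count_nil, Nat.add_zero]
      exact countP_sndOf_lt c (x :: xs) i i le_rfl
    | succ p' =>
      have hcast : ((i : Int) + 1) = ((i + 1 : Nat) : Int) := by push_cast; ring
      have hcast2 : ((i + (p' + 1) : Nat) : Int) = (((i + 1) + p' : Nat) : Int) := by
        push_cast; ring
      by_cases hx : x = '_'
      · have hpieces : piecesAux (x :: xs) (i : Int) = piecesAux xs ((i : Int) + 1) := by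
          simp [piecesAux, hx]
        rw [hpieces, hcast, hcast2, ih (i + 1) p']
        have hxc : ¬ x = c := fun h => hc (h ▸ hx ▸ rfl)
        simp [List.count_cons, hxc]
      · have hpieces : piecesAux (x :: xs) (i : Int) =
            (x, (i : Int)) :: piecesAux xs ((i : Int) + 1) := by
          simp [piecesAux, hx]
        rw [hpieces]
        by_cases hxc : x = c
        · subst hxc
          rw [sndOf_cons_self]
          rw [List.countP_cons]
          rw [hcast, hcast2, ih (i + 1) p']
          have hilt : ((i : Int) < ((i + (p' + 1) : Nat) : Int)) := by push_cast; omega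
          simp [List.count_cons, hilt]
          omega
        · rw [sndOf_cons_ne c x hxc, hcast, hcast2, ih (i + 1) p']
          simp [List.count_cons, hxc]

-- the counter update of B's loop, componentwise
theorem pvUpd (a : Char) (sL sR : Int) :
    (if a = 'L' then (sL + 1, sR) else if a = 'R' then (sL, sR + 1) else (sL, sR)) =
      (sL + (if a = 'L' then (1 : Int) else 0), sR + (if a = 'R' then (1 : Int) else 0)) := by
  by_cases h1 : a = 'L'
  · subst h1; simp
  · by_cases h2 : a = 'R' <;> simp [h1, h2]

-- List.count with the membership test written the way the loop tests characters
theorem count_cons_flip (c x : Char) (l : List Char) :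
    List.count c (x :: l) = List.count c l + if x = c then 1 else 0 := by
  by_cases h : x = c
  · subst h; simp [List.count_cons]
  · simp [List.count_cons, h, Ne.symm h]

-- B's loop is the prefix-count condition
theorem pvBLoop_iff (pz : List (Char × Char)) : ∀ (sL tL sR tR : Int),
    pvBLoop pz sL tL sR tR = true ↔
      ∀ p < pz.length,
        sL + (((pz.take (p+1)).map Prod.fst).count 'L' : Int) ≤
          tL + (((pz.take (p+1)).map Prod.snd).count 'L' : Int) ∧
        tR + (((pz.take (p+1)).map Prod.snd).count 'R' : Int) ≤
          sR + (((pz.take (p+1)).map Prod.fst).count 'R' : Int) := by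
  induction pz with
  | nil => intro sL tL sR tR; simp [pvBLoop]
  | cons ab rest ih =>
    intro sL tL sR tR
    obtain ⟨a, b⟩ := ab
    simp only [pvBLoop, pvUpd, List.length_cons, List.take_succ_cons, List.map_cons,
      count_cons_flip]
    push_cast
    generalize (if a = 'L' then (1 : Int) else 0) = dA
    generalize (if a = 'R' then (1 : Int) else 0) = eA
    generalize (if b = 'L' then (1 : Int) else 0) = dB
    generalize (if b = 'R' then (1 : Int) else 0) = eB
    split_ifs with hg
    · simp only [false_iff, not_forall]
      refine ⟨0, by omega, ?_⟩
      simp only [List.take_zero, List.map_nil, List.count_nil]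
      push_cast
      omega
    · rw [ih]
      rw [not_or] at hg
      rcases hg with ⟨hg1, hg2⟩
      rw [not_lt] at hg1 hg2
      constructor
      · intro h p hp
        cases p with
        | zero =>
          simp only [List.take_zero, List.map_nil, List.count_nil]
          push_cast
          omega
        | succ p' =>
          have hh := h p' (by simpa using hp)
          omega
      · intro h p hp
        have hh := h (p + 1) (by simp; omega)
        omega

-- small list utilities used by the assembly
theorem take_zip_comm {α β : Type} (l : List α) :
    ∀ (m : List β) (n : Nat), (l.zip m).take n = (l.take n).zip (m.take n) := by
  induction l with
  | nil => intro m n; simp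
  | cons a l ih =>
    intro m n
    cases m with
    | nil => simp
    | cons b m =>
      cases n with
      | zero => simp
      | succ n => simp [ih m n]

theorem pvForall₂Swap {r : Int → Int → Prop} :
    ∀ {u v : List Int}, List.Forall₂ r u v → List.Forall₂ (fun a b => r b a) v u := by
  intro u v h
  induction h with
  | nil => exact List.Forall₂.nil
  | cons h _ ih => exact List.Forall₂.cons h ih

theorem len_filter {α : Type} (p : α → Bool) (l : List α) :
    (l.filter p).length = l.countP p := by
  induction l with
  | nil => simp
  | cons a l ih => by_cases h : p a <;> simp [h, ih]

theorem length_sndOf (c : Char) (ps : List (Char × Int)) :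
    (sndOf c ps).length = (ps.map Prod.fst).countP (fun x => x = c) := by
  simp only [sndOf, List.length_map, len_filter, List.countP_map]
  rfl

-- Int-indexed prefix counts of the piece indices ↔ Nat-indexed prefix counts of takes
theorem int_nat_bridge (c : Char) (hc : c ≠ '_') (u v : List Char)
    (hcnt : u.count c = v.count c) (hlen : u.length = v.length) :
    (∀ p : Int, (sndOf c (piecesAux u 0)).countP (fun x => x < p) ≤
        (sndOf c (piecesAux v 0)).countP (fun x => x < p)) ↔
      (∀ q < u.length, (u.take (q + 1)).count c ≤ (v.take (q + 1)).count c) := by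
  have hb : ∀ (w : List Char) (k : Nat),
      (sndOf c (piecesAux w 0)).countP (fun x => x < ((0 + k : Nat) : Int)) =
        (w.take k).count c := fun w k => by
    simpa using countP_sndOf c hc w 0 k
  constructor
  · intro h q _
    have := h ((0 + (q + 1) : Nat) : Int)
    rwa [hb u (q + 1), hb v (q + 1)] at this
  · intro h p
    by_cases hp : p ≤ 0
    · have h0 : ((0 : Nat) : Int) = 0 := rfl
      rw [show (piecesAux u 0) = (piecesAux u ((0 : Nat) : Int)) by rw [h0],
          show (piecesAux v 0) = (piecesAux v ((0 : Nat) : Int)) by rw [h0]]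
      rw [countP_sndOf_lt c u 0 p (by simpa using hp)]
      exact Nat.zero_le _
    · have hq : p = ((0 + (p.toNat - 1 + 1) : Nat) : Int) := by push_cast; omega
      rw [hq, hb u _, hb v _]
      by_cases hqn : p.toNat - 1 < u.length
      · exact h _ hqn
      · rw [List.take_of_length_le (by omega), List.take_of_length_le (by omega), hcnt]

-- ===== VERDICT =====
theorem solution_1615_1_spec : Claim_equal_solution_1615_1 := by
  unfold Claim_equal_solution_1615_1 Spec_solution_1615_1
  intro start target _dom
  have hus : ("_" : String).toList = ['_'] := rfl
  have hcs : PySem.Str.count start "_" = start.toList.count '_' := by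
    rw [PySem.Str.count_eq, hus]; exact count_single _ _
  have hct : PySem.Str.count target "_" = target.toList.count '_' := by
    rw [PySem.Str.count_eq, hus]; exact count_single _ _
  simp only [solution_1615_1, solution_1615_1_alt, PySem.Str.len_eq, hcs, hct,
             filterMap_enumerate_eq_piecesAux]
  have hl1 : start.toList.length = start.length := by simp
  have hl2 : target.toList.length = target.length := by simp
  have hq1 := length_piecesAux start.toList 0
  have hq2 := length_piecesAux target.toList 0
  have hrep : (PySem.Str.replace start "_" "" = PySem.Str.replace target "_" "") ↔
      (start.toList.filter (· ≠ '_') = target.toList.filter (· ≠ '_')) := by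
    rw [← String.toList_inj, PySem.Str.toList_replace, PySem.Str.toList_replace, hus,
        show ("" : String).toList = [] from rfl, replace_underscore, replace_underscore]
  have hpl : (piecesAux start.toList 0).length = (start.toList.filter (· ≠ '_')).length := by
    rw [← map_fst_piecesAux start.toList 0]; simp
  have hpm : (piecesAux target.toList 0).length = (target.toList.filter (· ≠ '_')).length := by
    rw [← map_fst_piecesAux target.toList 0]; simp
  split_ifs with hA hB1 hB2 hC1 hC2
  · rfl
  · rfl
  · have hn : start.toList.length = target.toList.length := by exact_mod_cast not_ne_iff.mp hB1
    have hfe := hrep.mp (not_ne_iff.mp hB2)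
    rw [hfe] at hpl
    rcases hA with h | h
    · exact absurd (by exact_mod_cast hn) h
    · omega
  · rcases not_or.mp hA with ⟨h1, _⟩
    exact absurd hC1 h1
  · rcases not_or.mp hA with ⟨h1, h2⟩
    have hn : start.toList.length = target.toList.length := by exact_mod_cast not_ne_iff.mp h1
    have hcnt := not_ne_iff.mp h2
    rw [pvALoop_eq_pieceMatch _ _ (by omega)]
    exact pieceMatch_false_of_fst_ne _ _ (by
      rw [map_fst_piecesAux, map_fst_piecesAux]
      exact fun h => hC2 (hrep.mpr h))
  · rcases not_or.mp hA with ⟨h1, _⟩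
    have hn : start.toList.length = target.toList.length := by exact_mod_cast not_ne_iff.mp h1
    have hfe := hrep.mp (not_ne_iff.mp hC2)
    have hmap : (piecesAux start.toList 0).map Prod.fst = (piecesAux target.toList 0).map Prod.fst := by
      rw [map_fst_piecesAux, map_fst_piecesAux]; exact hfe
    have hcL : start.toList.count 'L' = target.toList.count 'L' := by
      have e1 : (start.toList.filter (· ≠ '_')).count 'L' = start.toList.count 'L' :=
        List.count_filter (by decide)
      have e2 : (target.toList.filter (· ≠ '_')).count 'L' = target.toList.count 'L' :=
        List.count_filter (by decide)
      rw [← e1, ← e2, hfe]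
    have hcR : start.toList.count 'R' = target.toList.count 'R' := by
      have e1 : (start.toList.filter (· ≠ '_')).count 'R' = start.toList.count 'R' :=
        List.count_filter (by decide)
      have e2 : (target.toList.filter (· ≠ '_')).count 'R' = target.toList.count 'R' :=
        List.count_filter (by decide)
      rw [← e1, ← e2, hfe]
    rw [pvALoop_eq_pieceMatch _ _ (by rw [hpl, hpm, hfe]), Bool.eq_iff_iff]
    rw [pieceMatch_iff _ _ hmap, pvBLoop_iff]
    have hlenL : (sndOf 'L' (piecesAux start.toList 0)).length =
        (sndOf 'L' (piecesAux target.toList 0)).length := by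
      rw [length_sndOf, length_sndOf, hmap]
    have hlenR : (sndOf 'R' (piecesAux start.toList 0)).length =
        (sndOf 'R' (piecesAux target.toList 0)).length := by
      rw [length_sndOf, length_sndOf, hmap]
    rw [dominance _ _ (sndOf_pairwise _ _ (piecesAux_snd_pairwise _ _))
          (sndOf_pairwise _ _ (piecesAux_snd_pairwise _ _)) hlenL]
    have hRswap : List.Forall₂ (fun a b => a ≤ b) (sndOf 'R' (piecesAux start.toList 0))
          (sndOf 'R' (piecesAux target.toList 0)) ↔
        List.Forall₂ (fun a b => b ≤ a) (sndOf 'R' (piecesAux target.toList 0))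
          (sndOf 'R' (piecesAux start.toList 0)) :=
      ⟨fun h => pvForall₂Swap h, fun h => pvForall₂Swap h⟩
    rw [hRswap,
        dominance _ _ (sndOf_pairwise _ _ (piecesAux_snd_pairwise _ _))
          (sndOf_pairwise _ _ (piecesAux_snd_pairwise _ _)) hlenR.symm]
    rw [int_nat_bridge 'L' (by decide) _ _ hcL hn,
        int_nat_bridge 'R' (by decide) _ _ hcR.symm hn.symm]
    have hzipf : ∀ q : Nat, ((start.toList.zip target.toList).take q).map Prod.fst =
        start.toList.take q := fun q => by
      rw [take_zip_comm]
      exact List.map_fst_zip (by simp; omega)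
    have hzips : ∀ q : Nat, ((start.toList.zip target.toList).take q).map Prod.snd =
        target.toList.take q := fun q => by
      rw [take_zip_comm]
      exact List.map_snd_zip (by simp; omega)
    have hziplen : (start.toList.zip target.toList).length = start.toList.length := by
      simp [List.length_zip]; omega
    constructor
    · rintro ⟨hL, hR⟩ p hp
      rw [hziplen] at hp
      have h1 := hL p hp
      have h2 := hR p (by omega)
      rw [hzipf, hzips]
      omega
    · intro h
      refine ⟨fun q hq => ?_, fun q hq => ?_⟩
      · have := h q (by omega)
        rw [hzipf, hzips] at this
        omega
      · have := h q (by omega)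
        rw [hzipf, hzips] at this
        omega
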